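-- pv_equiv track=rewrite | github.com/nassimbattache/Th-orie-des-graphes | TP03_EX03.py | liste_transpose
-- ===== SOURCE A (Python) =====
-- def liste_transpose(matAdjGraphe,sommets):
--     d = {}
--     N = len(matAdjGraphe)
--     matAdjGraphe= [[matAdjGraphe[j][i] for j in range(len(matAdjGraphe))] for i in range(len(matAdjGraphe[0]))]
--     for i in range(N):
--         d[sommets[int(i)]] = {}
--         for j in range(N):
--               if matAdjGraphe[i][j]!=0:
--                   d[sommets[int(i)]][sommets[int(j)]]=matAdjGraphe[i][j]
--     return d
-- ===== SOURCE B (Python) =====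
-- def liste_transpose(matAdjGraphe, sommets):
--     # Row-major scatter: one pass over the matrix rows distributing each nonzero
--     # entry into a per-column bucket, then assemble the dict from the buckets.
--     N = len(matAdjGraphe)
--     buckets = [[] for _ in range(N)]
--     for j in range(N):
--         row = matAdjGraphe[j]
--         for i in range(N):
--             v = row[i]
--             if v != 0:
--                 buckets[i].append((sommets[j], v))
--     return {sommets[i]: dict(buckets[i]) for i in range(N)}
-- ===== Notes on version B (the rewrite author's own statement) =====
-- stated objective: alternative
-- what changed: A transposes the matrix and then gathers each column into a fresh inner dict with nested dict mutation; B never transposes: it makes one row-major scatter pass distributing each nonzero entry into a per-column bucket list and assembles the dict of dicts from the buckets at the end.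
import Mathlib
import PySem

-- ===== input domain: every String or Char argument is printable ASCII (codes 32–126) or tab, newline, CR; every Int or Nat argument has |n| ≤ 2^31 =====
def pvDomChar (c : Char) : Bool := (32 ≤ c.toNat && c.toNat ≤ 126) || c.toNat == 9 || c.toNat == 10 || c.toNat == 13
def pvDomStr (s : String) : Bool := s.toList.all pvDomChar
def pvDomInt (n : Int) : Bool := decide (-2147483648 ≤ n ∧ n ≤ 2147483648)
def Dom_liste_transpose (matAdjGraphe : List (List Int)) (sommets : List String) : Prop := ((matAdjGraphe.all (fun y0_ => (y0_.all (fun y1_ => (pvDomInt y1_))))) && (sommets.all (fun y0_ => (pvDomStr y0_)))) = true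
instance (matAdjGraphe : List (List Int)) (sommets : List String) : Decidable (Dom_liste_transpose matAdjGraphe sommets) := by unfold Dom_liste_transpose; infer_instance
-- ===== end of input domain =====

-- B replaces A's column-major "transpose, then gather each column into a fresh inner dict"
-- by a row-major scatter: one pass over the matrix rows distributes each nonzero entry into
-- a per-column bucket list, and the dict of dicts is assembled from the buckets at the end
-- (objective: alternative decomposition, same O(n^2) cost).

-- ===== PORT A =====
def liste_transpose (matAdjGraphe : List (List Int)) (sommets : List String) : List (String × List (String × Int)) :=
  let N : Int := matAdjGraphe.length
  -- matAdjGraphe = [[matAdjGraphe[j][i] for j in range(len(matAdjGraphe))] for i in range(len(matAdjGraphe[0]))]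
  let t : List (List Int) :=
    (PySem.List.pyRange 0 ((PySem.List.pyGetD matAdjGraphe 0 []).length : Int) 1).map (fun i =>
      (PySem.List.pyRange 0 (matAdjGraphe.length : Int) 1).map (fun j =>
        PySem.List.pyGetD (PySem.List.pyGetD matAdjGraphe j []) i 0))
  let d : PySem.Dict String (PySem.Dict String Int) :=
    (PySem.List.pyRange 0 N 1).foldl (fun d i =>
      let key := PySem.List.pyGetD sommets i ""
      let d := d.insert key PySem.Dict.empty
      (PySem.List.pyRange 0 N 1).foldl (fun d j =>
        let v := PySem.List.pyGetD (PySem.List.pyGetD t i []) j 0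
        if v ≠ 0 then
          -- d[sommets[i]][sommets[j]] = v  (sommets[i] is present: just inserted/updated)
          d.insert key ((d.getD key PySem.Dict.empty).insert (PySem.List.pyGetD sommets j "") v)
        else d) d) PySem.Dict.empty
  d.items.map (fun p => (p.1, p.2.items))

-- ===== PORT B =====
def liste_transpose_alt (matAdjGraphe : List (List Int)) (sommets : List String) : List (String × List (String × Int)) :=
  let N : Int := matAdjGraphe.length
  -- buckets = [[] for _ in range(N)]
  let buckets0 : List (List (String × Int)) :=
    (PySem.List.pyRange 0 N 1).map (fun _ => ([] : List (String × Int)))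
  -- for j in range(N): row = matAdjGraphe[j]; for i in range(N): if row[i] != 0: buckets[i].append((sommets[j], row[i]))
  let buckets : List (List (String × Int)) :=
    (PySem.List.pyRange 0 N 1).foldl (fun b j =>
      let row := PySem.List.pyGetD matAdjGraphe j []
      (PySem.List.pyRange 0 N 1).foldl (fun b i =>
        let v := PySem.List.pyGetD row i 0
        if v ≠ 0 then
          -- buckets[i].append(...); i comes from range(N) so 0 ≤ i and .toNat is exact
          b.set i.toNat (PySem.List.pyGetD b i [] ++ [(PySem.List.pyGetD sommets j "", v)])
        else b) b) buckets0
  -- {sommets[i]: dict(buckets[i]) for i in range(N)}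
  let d : PySem.Dict String (PySem.Dict String Int) :=
    (PySem.List.pyRange 0 N 1).foldl (fun d i =>
      d.insert (PySem.List.pyGetD sommets i "")
        (PySem.Dict.ofList (PySem.List.pyGetD buckets i []))) PySem.Dict.empty
  d.items.map (fun p => (p.1, p.2.items))

-- ===== PRECONDITION & SPEC =====
-- Pre_ excludes exactly the inputs where the Python A raises IndexError: the empty matrix,
-- matrices with a row shorter than the first row, matrices with fewer columns (in row 0)
-- than rows, and vertex lists shorter than the number of rows.
def Pre_liste_transpose (matAdjGraphe : List (List Int)) (sommets : List String) : Prop :=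
  matAdjGraphe ≠ [] ∧
  (∀ row ∈ matAdjGraphe, (matAdjGraphe.headD []).length ≤ row.length) ∧
  matAdjGraphe.length ≤ (matAdjGraphe.headD []).length ∧
  matAdjGraphe.length ≤ sommets.length
instance (matAdjGraphe : List (List Int)) (sommets : List String) : Decidable (Pre_liste_transpose matAdjGraphe sommets) := by unfold Pre_liste_transpose; infer_instance
def pvWitness_liste_transpose : List (List Int) × List String := ([[0, 1], [2, 0]], ["a", "b"])


def Spec_liste_transpose (matAdjGraphe : List (List Int)) (sommets : List String) (out : List (String × List (String × Int))) : Prop := out = liste_transpose_alt matAdjGraphe sommets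
instance (matAdjGraphe : List (List Int)) (sommets : List String) (out : List (String × List (String × Int))) : Decidable (Spec_liste_transpose matAdjGraphe sommets out) := by unfold Spec_liste_transpose; infer_instance

-- ===== CLAIM (what is proved, stated in full; the proofs are below) =====
def Claim_equal_liste_transpose : Prop := ∀ (matAdjGraphe : List (List Int)) (sommets : List String), Dom_liste_transpose matAdjGraphe sommets → Pre_liste_transpose matAdjGraphe sommets → Spec_liste_transpose matAdjGraphe sommets (liste_transpose matAdjGraphe sommets)

-- ===== LEMMAS AND PROOFS =====

-- A's inner loop, which repeatedly re-inserts the (present) outer key with an updated inner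
-- dict, equals one insert of the inner dict built by a fold from empty.
theorem inner_loop_as_insert {κ ν : Type} [BEq κ] [LawfulBEq κ]
    (L : List Int) (d : PySem.Dict κ (PySem.Dict κ ν)) (key : κ) (m0 : PySem.Dict κ ν)
    (c : Int → Prop) [DecidablePred c] (kf : Int → κ) (vf : Int → ν) :
    L.foldl (fun d j => if c j then
        d.insert key ((d.getD key PySem.Dict.empty).insert (kf j) (vf j)) else d)
      (d.insert key m0)
    = d.insert key (L.foldl (fun m j => if c j then m.insert (kf j) (vf j) else m) m0) := by
  induction L generalizing m0 with
  | nil => rfl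
  | cons j L ih =>
    simp only [List.foldl_cons]
    by_cases h : c j
    · simp only [if_pos h, PySem.Dict.getD_insert_self, PySem.Dict.insert_insert_self]
      exact ih _
    · simp only [if_neg h]
      exact ih _

-- a conditional-insert fold from any dict = fold of the filtered key/value pair list
theorem insert_fold_as_pairs {κ ν : Type} [BEq κ]
    (L : List Int) (e : PySem.Dict κ ν)
    (c : Int → Prop) [DecidablePred c] (kf : Int → κ) (vf : Int → ν) :
    L.foldl (fun m j => if c j then m.insert (kf j) (vf j) else m) e
    = ((L.filter (fun j => decide (c j))).map (fun j => (kf j, vf j))).foldl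
        (fun m q => m.insert q.1 q.2) e := by
  induction L generalizing e with
  | nil => rfl
  | cons j L ih =>
    by_cases h : c j
    · simp only [List.foldl_cons, List.filter_cons, decide_eq_true h, if_pos h]
      exact ih _
    · simp only [List.foldl_cons, List.filter_cons, decide_eq_false h, if_neg h]
      exact ih _

theorem mapIdx_id' {α : Type} (l : List α) : l.mapIdx (fun _ x => x) = l := by
  induction l with
  | nil => rfl
  | cons x l ih => rw [List.mapIdx_cons, ih]

theorem mapIdx_mapIdx' {α β γ : Type} (l : List α) (f : Nat → α → β) (g : Nat → β → γ) :
    (l.mapIdx f).mapIdx g = l.mapIdx (fun k x => g k (f k x)) := by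
  induction l generalizing f g with
  | nil => rfl
  | cons x l ih => simp only [List.mapIdx_cons, ih]

theorem flatMap_ite_singleton {α β : Type} (L : List α) (p : α → Prop) [DecidablePred p]
    (f : α → β) :
    L.flatMap (fun j => if p j then [f j] else [])
    = (L.filter (fun j => decide (p j))).map f := by
  induction L with
  | nil => rfl
  | cons j L ih =>
    by_cases h : p j
    · simp [List.flatMap_cons, h, ih]
    · simp [List.flatMap_cons, h, ih]

-- one scatter pass 'for i in range(len(b)): if c i: b[i] += [e i]' appends per index
theorem scatter_pass {E : Type} (c : Int → Prop) [DecidablePred c] (e : Int → E)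
    (pre b : List (List E)) :
    (PySem.List.pyRange (pre.length : Int) ((pre.length : Int) + (b.length : Int)) 1).foldl
      (fun bb i => if c i then
          bb.set i.toNat (PySem.List.pyGetD bb i [] ++ [e i]) else bb) (pre ++ b)
    = pre ++ b.mapIdx (fun k x =>
        x ++ if c ((pre.length + k : Nat) : Int) then [e ((pre.length + k : Nat) : Int)] else []) := by
  induction b generalizing pre with
  | nil =>
    rw [PySem.List.pyRange_one_eq_nil (by simp)]
    simp
  | cons x bs ih =>
    have hlt : (pre.length : Int) < (pre.length : Int) + ((x :: bs).length : Int) := by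
      simp only [List.length_cons]; push_cast; omega
    rw [PySem.List.pyRange_one_cons hlt, List.foldl_cons]
    have hget : PySem.List.pyGetD (pre ++ x :: bs) (pre.length : Int) [] = x := by
      rw [PySem.List.pyGetD_natCast]
      simp [List.getD]
    have hstep : (if c (pre.length : Int) then
          (pre ++ x :: bs).set ((pre.length : Int)).toNat
            (PySem.List.pyGetD (pre ++ x :: bs) (pre.length : Int) [] ++ [e (pre.length : Int)])
        else (pre ++ x :: bs))
        = (pre ++ [x ++ if c (pre.length : Int) then [e (pre.length : Int)] else []]) ++ bs := by
      by_cases h : c (pre.length : Int)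
      · rw [if_pos h, if_pos h, hget, Int.toNat_natCast,
          List.set_append_right _ _ (Nat.le_refl pre.length)]
        simp
      · rw [if_neg h, if_neg h]
        simp
    rw [hstep]
    have hrange : PySem.List.pyRange ((pre.length : Int) + 1)
          ((pre.length : Int) + ((x :: bs).length : Int)) 1
        = PySem.List.pyRange
            (((pre ++ [x ++ if c (pre.length : Int) then [e (pre.length : Int)] else []]).length : Int))
            (((pre ++ [x ++ if c (pre.length : Int) then [e (pre.length : Int)] else []]).length : Int)
              + (bs.length : Int)) 1 := by
      congr 1
      · simp
      · simp only [List.length_append, List.length_cons, List.length_nil]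
        push_cast
        ring
    rw [hrange, ih]
    simp only [List.mapIdx_cons, List.length_append, List.length_cons, List.length_nil]
    have harg : ∀ k : Nat, pre.length + 1 + k = pre.length + (k + 1) := by omega
    simp only [harg, Nat.add_zero, List.append_assoc, List.singleton_append]

-- repeating the scatter pass over rows j accumulates, per bucket, all its row contributions
theorem scatter_loop {E : Type} (c : Int → Int → Prop) [∀ j i, Decidable (c j i)]
    (e : Int → Int → E) (n : Nat) :
    ∀ (Js : List Int) (b : List (List E)), b.length = n →
    Js.foldl (fun b j =>
        (PySem.List.pyRange 0 (n : Int) 1).foldl (fun bb i => if c j i then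
            bb.set i.toNat (PySem.List.pyGetD bb i [] ++ [e j i]) else bb) b) b
    = b.mapIdx (fun k x =>
        x ++ Js.flatMap (fun j => if c j ((k : Nat) : Int) then [e j ((k : Nat) : Int)] else [])) := by
  intro Js
  induction Js with
  | nil =>
    intro b hb
    simp only [List.foldl_nil, List.flatMap_nil, List.append_nil]
    exact (mapIdx_id' b).symm
  | cons j Js ih =>
    intro b hb
    rw [List.foldl_cons]
    have h0 : (PySem.List.pyRange 0 (n : Int) 1).foldl (fun bb i => if c j i then
          bb.set i.toNat (PySem.List.pyGetD bb i [] ++ [e j i]) else bb) b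
        = b.mapIdx (fun k x => x ++ if c j ((k : Nat) : Int) then [e j ((k : Nat) : Int)] else []) := by
      have := scatter_pass (c j) (e j) [] b
      simpa [hb] using this
    rw [h0, ih _ (by rw [List.length_mapIdx, hb]), mapIdx_mapIdx']
    simp only [List.flatMap_cons, List.append_assoc]

theorem liste_transpose_eq (matAdjGraphe : List (List Int)) (sommets : List String)
    (hpre : Pre_liste_transpose matAdjGraphe sommets) :
    liste_transpose matAdjGraphe sommets = liste_transpose_alt matAdjGraphe sommets := by
  obtain ⟨hne, -, hW, -⟩ := hpre
  unfold liste_transpose liste_transpose_alt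
  simp only
  congr 1
  congr 1
  -- characterise B's bucket list
  have hblen : ((PySem.List.pyRange 0 (matAdjGraphe.length : Int) 1).map
      (fun _ => ([] : List (String × Int)))).length = matAdjGraphe.length := by
    simp [PySem.List.length_pyRange_one]
  rw [scatter_loop (fun j i => PySem.List.pyGetD (PySem.List.pyGetD matAdjGraphe j []) i 0 ≠ 0)
      (fun j i => (PySem.List.pyGetD sommets j "",
        PySem.List.pyGetD (PySem.List.pyGetD matAdjGraphe j []) i 0))
      matAdjGraphe.length _ _ hblen]
  apply PySem.List.foldl_congr_mem
  intro d i hi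
  rw [PySem.List.mem_pyRange_one] at hi
  rw [inner_loop_as_insert]
  congr 1
  -- B's bucket i, read back
  have hit : i.toNat < matAdjGraphe.length := by omega
  have hbucket : PySem.List.pyGetD
      (((PySem.List.pyRange 0 (matAdjGraphe.length : Int) 1).map
        (fun _ => ([] : List (String × Int)))).mapIdx (fun k x => x ++ (PySem.List.pyRange 0 (matAdjGraphe.length : Int) 1).flatMap
          (fun j => if PySem.List.pyGetD (PySem.List.pyGetD matAdjGraphe j []) (k : Int) 0 ≠ 0
            then [(PySem.List.pyGetD sommets j "",
              PySem.List.pyGetD (PySem.List.pyGetD matAdjGraphe j []) (k : Int) 0)] else []))) i []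
      = (PySem.List.pyRange 0 (matAdjGraphe.length : Int) 1).flatMap
          (fun j => if PySem.List.pyGetD (PySem.List.pyGetD matAdjGraphe j []) i 0 ≠ 0
            then [(PySem.List.pyGetD sommets j "",
              PySem.List.pyGetD (PySem.List.pyGetD matAdjGraphe j []) i 0)] else []) := by
    rw [PySem.List.pyGetD_eq_getElem _ _ hi.1 (by simp [PySem.List.length_pyRange_one]; omega)]
    rw [List.getElem_mapIdx]
    have hnil : ((PySem.List.pyRange 0 (matAdjGraphe.length : Int) 1).map
        (fun _ => ([] : List (String × Int))))[i.toNat]'(by rw [hblen]; exact hit) = [] := by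
      simp
    rw [hnil, List.nil_append, Int.toNat_of_nonneg hi.1]
  rw [hbucket, flatMap_ite_singleton
      (p := fun j => PySem.List.pyGetD (PySem.List.pyGetD matAdjGraphe j []) i 0 ≠ 0)]
  -- dict(bucket) is a pair fold from empty; match it with A's conditional-insert fold
  show _ = PySem.Dict.empty.update _
  rw [PySem.Dict.update]
  -- finally: A's condition/value read t[i][j]; rewrite them to matAdjGraphe[j][i]
  have h0 : PySem.List.pyGetD matAdjGraphe 0 [] = matAdjGraphe.headD [] := by
    cases matAdjGraphe with
    | nil => exact absurd rfl hne
    | cons r rs => simp [PySem.List.pyGetD_zero_cons]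
  have hiW : i < ((PySem.List.pyGetD matAdjGraphe 0 []).length : Int) := by
    rw [h0]; omega
  have ht : ∀ j, 0 ≤ j → j < (matAdjGraphe.length : Int) →
      PySem.List.pyGetD (PySem.List.pyGetD
        ((PySem.List.pyRange 0 ((PySem.List.pyGetD matAdjGraphe 0 []).length : Int) 1).map (fun i =>
          (PySem.List.pyRange 0 (matAdjGraphe.length : Int) 1).map (fun j =>
            PySem.List.pyGetD (PySem.List.pyGetD matAdjGraphe j []) i 0))) i []) j 0
      = PySem.List.pyGetD (PySem.List.pyGetD matAdjGraphe j []) i 0 := by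
    intro j hj0 hjN
    rw [PySem.List.pyGetD_map_pyRange_of_nonneg _ _ _ _ hi.1 hiW,
        PySem.List.pyGetD_map_pyRange_of_nonneg _ _ _ _ hj0 hjN]
  -- rewrite A's fold body pointwise over j ∈ range, then both sides coincide
  have hfilter : (PySem.List.pyRange 0 (matAdjGraphe.length : Int) 1).filter
        (fun j => decide (PySem.List.pyGetD (PySem.List.pyGetD
          ((PySem.List.pyRange 0 ((PySem.List.pyGetD matAdjGraphe 0 []).length : Int) 1).map (fun i =>
            (PySem.List.pyRange 0 (matAdjGraphe.length : Int) 1).map (fun j =>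
              PySem.List.pyGetD (PySem.List.pyGetD matAdjGraphe j []) i 0))) i []) j 0 ≠ 0))
      = (PySem.List.pyRange 0 (matAdjGraphe.length : Int) 1).filter
        (fun j => decide (PySem.List.pyGetD (PySem.List.pyGetD matAdjGraphe j []) i 0 ≠ 0)) := by
    apply List.filter_congr
    intro j hj
    rw [PySem.List.mem_pyRange_one] at hj
    rw [ht j hj.1 hj.2]
  rw [insert_fold_as_pairs _ _
      (fun j => PySem.List.pyGetD (PySem.List.pyGetD
        ((PySem.List.pyRange 0 ((PySem.List.pyGetD matAdjGraphe 0 []).length : Int) 1).map (fun i =>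
          (PySem.List.pyRange 0 (matAdjGraphe.length : Int) 1).map (fun j =>
            PySem.List.pyGetD (PySem.List.pyGetD matAdjGraphe j []) i 0))) i []) j 0 ≠ 0),
     hfilter]
  congr 1
  apply List.map_congr_left
  intro j hj
  have hj' := (List.mem_filter.mp hj).1
  rw [PySem.List.mem_pyRange_one] at hj'
  rw [ht j hj'.1 hj'.2]

-- ===== VERDICT (by name: the statement is the Claim_ definition above) =====
theorem liste_transpose_spec : Claim_equal_liste_transpose := by
  intro mat somm _ hpre
  exact liste_transpose_eq mat somm hpre
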